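-- pv_equiv track=rewrite | github.com/emaste/diffoscope | diffoscope/presenters/html.py | linediff
-- ===== SOURCE A (Python) =====
-- DIFFON = "\x01"
--
-- DIFFOFF = "\x02"
--
-- def sane(x):
--     r = ""
--     for i in x:
--         j = ord(i)
--         if i not in ['\t', '\n'] and (j < 32):
--             r = r + "."
--         else:
--             r = r + i
--     return r
--
-- def linediff(s, t):
--     '''
--     Original line diff algorithm of diff2html. It's character based.
--     '''
--     if len(s):
--         s = ''.join([ sane(c) for c in s ])
--     if len(t):
--         t = ''.join([ sane(c) for c in t ])
--
--     m, n = len(s), len(t)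
--     d = [[(0, 0) for i in range(n+1)] for i in range(m+1)]
--
--
--     d[0][0] = (0, (0, 0))
--     for i in range(m+1)[1:]:
--         d[i][0] = (i,(i-1, 0))
--     for j in range(n+1)[1:]:
--         d[0][j] = (j,(0, j-1))
--
--     for i in range(m+1)[1:]:
--         for j in range(n+1)[1:]:
--             if s[i-1] == t[j-1]:
--                 cost = 0
--             else:
--                 cost = 1
--             d[i][j] = min((d[i-1][j][0] + 1, (i-1, j)),
--                           (d[i][j-1][0] + 1, (i, j-1)),
--                           (d[i-1][j-1][0] + cost, (i-1, j-1)))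
--
--     l = []
--     coord = (m, n)
--     while coord != (0, 0):
--         l.insert(0, coord)
--         x, y = coord
--         coord = d[x][y][1]
--
--     l1 = []
--     l2 = []
--
--     for coord in l:
--         cx, cy = coord
--         child_val = d[cx][cy][0]
--
--         father_coord = d[cx][cy][1]
--         fx, fy = father_coord
--         father_val = d[fx][fy][0]
--
--         diff = (cx-fx, cy-fy)
--
--         if diff == (0, 1):
--             l1.append("")
--             l2.append(DIFFON + t[fy] + DIFFOFF)
--         elif diff == (1, 0):
--             l1.append(DIFFON + s[fx] + DIFFOFF)
--             l2.append("")
--         elif child_val-father_val == 1: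
--             l1.append(DIFFON + s[fx] + DIFFOFF)
--             l2.append(DIFFON + t[fy] + DIFFOFF)
--         else:
--             l1.append(s[fx])
--             l2.append(t[fy])
--
--     return ''.join(l1).replace(DIFFOFF + DIFFON, ''), ''.join(l2).replace(DIFFOFF + DIFFON, '')
-- ===== SOURCE B (Python) =====
-- DIFFON = "\x01"
-- DIFFOFF = "\x02"
--
--
-- def linediff(s, t):
--     '''
--     Top-down demand-driven edit distance: a dict memo filled with an explicit
--     work stack (instead of a bottom-up matrix of (cost, parent) tuples); one
--     backward walk classifies each step as an edit operation, and the markup is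
--     produced by grouping runs of changed characters (no sentinel-pair replace).
--     '''
--     sane = lambda c: c if c in '\t\n' or ord(c) >= 32 else '.'
--     s = ''.join(map(sane, s))
--     t = ''.join(map(sane, t))
--     m, n = len(s), len(t)
--
--     memo = {}
--     stack = [(m, n)]
--     while stack:
--         i, j = stack.pop()
--         if (i, j) in memo:
--             continue
--         if i == 0:
--             memo[(i, j)] = j
--         elif j == 0:
--             memo[(i, j)] = i
--         else:
--             deps = [(i - 1, j), (i, j - 1), (i - 1, j - 1)]
--             missing = [p for p in deps if p not in memo]
--             if missing:
--                 stack.append((i, j))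
--                 stack.extend(missing)
--                 continue
--             sub = 0 if s[i - 1] == t[j - 1] else 1
--             memo[(i, j)] = min(memo[(i - 1, j)] + 1,
--                                memo[(i, j - 1)] + 1,
--                                memo[(i - 1, j - 1)] + sub)
--
--     # backward walk; ties break as the original lexicographic min does:
--     # diagonal first, then delete (up), then insert (left)
--     tok1, tok2 = [], []
--     i, j = m, n
--     while (i, j) != (0, 0):
--         if i == 0:
--             kind = 'ins'
--         elif j == 0:
--             kind = 'del'
--         else:
--             sub = 0 if s[i - 1] == t[j - 1] else 1
--             if memo[(i - 1, j - 1)] + sub == memo[(i, j)]: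
--                 kind = 'sub' if sub else 'copy'
--             elif memo[(i - 1, j)] + 1 == memo[(i, j)]:
--                 kind = 'del'
--             else:
--                 kind = 'ins'
--         if kind == 'ins':
--             j -= 1
--             tok2.append((t[j], True))
--         elif kind == 'del':
--             i -= 1
--             tok1.append((s[i], True))
--         else:
--             i -= 1
--             j -= 1
--             tok1.append((s[i], kind == 'sub'))
--             tok2.append((t[j], kind == 'sub'))
--     tok1.reverse()
--     tok2.reverse()
--
--     def render(toks):
--         out, run = [], []
--         for c, changed in toks:
--             if changed:
--                 run.append(c)
--             else:
--                 if run: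
--                     out.append(DIFFON + ''.join(run) + DIFFOFF)
--                     run = []
--                 out.append(c)
--         if run:
--             out.append(DIFFON + ''.join(run) + DIFFOFF)
--         return ''.join(out)
--
--     return render(tok1), render(tok2)
-- ===== Notes on version B (the rewrite author's own statement) =====
-- stated objective: alternative
-- what changed: B replaces A's bottom-up (m+1)x(n+1) matrix of (cost, parent-coordinate) tuples and its three later phases (store parents, collect the path with l.insert(0,..), a second emit loop keyed on coordinate differences, join + sentinel-pair str.replace) by: a top-down demand-driven edit-distance memo (a dict filled with an explicit work stack), one backward walk that classifies every step as an edit operation (copy/sub/del/ins, reproducing A's lexicographic tie-break: diagonal, then up, then left), and a renderer that groups runs of changed characters and wraps each run once in DIFFON/DIFFOFF …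
import Mathlib
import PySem

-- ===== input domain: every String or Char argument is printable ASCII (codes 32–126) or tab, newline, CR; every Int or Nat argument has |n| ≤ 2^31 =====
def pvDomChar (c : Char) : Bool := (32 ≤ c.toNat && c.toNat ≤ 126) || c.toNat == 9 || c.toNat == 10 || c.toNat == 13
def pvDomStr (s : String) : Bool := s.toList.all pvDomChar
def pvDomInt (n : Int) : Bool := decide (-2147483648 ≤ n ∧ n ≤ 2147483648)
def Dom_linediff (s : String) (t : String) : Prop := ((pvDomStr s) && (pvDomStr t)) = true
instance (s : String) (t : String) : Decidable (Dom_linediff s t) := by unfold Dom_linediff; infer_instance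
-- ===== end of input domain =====

-- B replaces A's bottom-up matrix of (cost, parent) tuples and its three later phases
-- (store parents, collect the path with insert(0,..), a second emit loop, join + sentinel
-- replace) by a top-down stack-driven dict memo of costs, one backward walk classifying
-- each step as an edit operation, and a renderer that wraps runs of changed characters.

-- ===== PORT A =====
-- A's sane(): loop over the characters of x, appending '.' or the character itself.
def pvSaneA (x : List Char) : List Char :=
  x.foldl (fun r i => if ¬(i = '\t' ∨ i = '\n') ∧ i.toNat < 32 then r ++ ['.'] else r ++ [i]) []

-- Python's min on (cost, (x, y)) tuples: lexicographic, the FIRST argument wins ties.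
-- All values here are nonnegative, so Nat comparison is exact.
def pvMin2 (a b : Nat × Nat × Nat) : Nat × Nat × Nat :=
  if b.1 < a.1 ∨ (b.1 = a.1 ∧ (b.2.1 < a.2.1 ∨ (b.2.1 = a.2.1 ∧ b.2.2 < a.2.2))) then b else a

-- min(x, y, z) = Python's left fold of pairwise min
def pvMin3 (a b c : Nat × Nat × Nat) : Nat × Nat × Nat := pvMin2 (pvMin2 a b) c

-- d[i][j] read; the defaults are never reached on the indices the program uses
def pvGetM (d : List (List (Nat × Nat × Nat))) (i j : Nat) : Nat × Nat × Nat :=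
  (d.getD i []).getD j (0, 0, 0)

-- Python's 'd[i][j] = v' on a list-of-lists matrix
def pvSetM (d : List (List (Nat × Nat × Nat))) (i j : Nat) (v : Nat × Nat × Nat) :
    List (List (Nat × Nat × Nat)) :=
  d.set i ((d.getD i []).set j v)

-- A's matrix build: the initialisation assignments and the nested DP loop, step for step
def pvDP (sl tl : List Char) (m n : Nat) : List (List (Nat × Nat × Nat)) :=
  let d0 := (List.range (m+1)).map (fun _ => (List.range (n+1)).map (fun _ => ((0:Nat), (0:Nat), (0:Nat))))
  let d1 := pvSetM d0 0 0 (0, 0, 0)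
  let d2 := (List.range m).foldl (fun d i0 => pvSetM d (i0+1) 0 (i0+1, i0+1-1, 0)) d1
  let d3 := (List.range n).foldl (fun d j0 => pvSetM d 0 (j0+1) (j0+1, 0, j0+1-1)) d2
  (List.range m).foldl (fun d i0 =>
    (List.range n).foldl (fun d j0 =>
      let i := i0 + 1
      let j := j0 + 1
      let cost : Nat := if sl.getD (i-1) ' ' = tl.getD (j-1) ' ' then 0 else 1
      pvSetM d i j (pvMin3 ((pvGetM d (i-1) j).1 + 1, (i-1, j))
                           ((pvGetM d i (j-1)).1 + 1, (i, j-1))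
                           ((pvGetM d (i-1) (j-1)).1 + cost, (i-1, j-1)))) d) d3

-- A's backtracking while-loop (l.insert(0, coord)); each stored parent strictly
-- decreases i+j, so fuel m+n+1 is never exhausted on the program's real runs.
def pvPathA (d : List (List (Nat × Nat × Nat))) :
    Nat → Nat × Nat → List (Nat × Nat) → List (Nat × Nat)
  | 0, _, acc => acc
  | fuel+1, coord, acc =>
      if coord = (0, 0) then acc
      else pvPathA d fuel (pvGetM d coord.1 coord.2).2 (coord :: acc)

-- one iteration of A's emit loop
def pvEmitStep (d : List (List (Nat × Nat × Nat))) (sl tl : List Char)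
    (p : List (List Char) × List (List Char)) (coord : Nat × Nat) :
    List (List Char) × List (List Char) :=
      let cx := coord.1; let cy := coord.2
      let childVal := (pvGetM d cx cy).1
      let father := (pvGetM d cx cy).2
      let fx := father.1; let fy := father.2
      let fatherVal := (pvGetM d fx fy).1
      let diff := (cx - fx, cy - fy)
      if diff = (0, 1) then (p.1 ++ [([] : List Char)], p.2 ++ [['\x01', tl.getD fy ' ', '\x02']])
      else if diff = (1, 0) then (p.1 ++ [['\x01', sl.getD fx ' ', '\x02']], p.2 ++ [([] : List Char)])
      else if childVal - fatherVal = 1 then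
        (p.1 ++ [['\x01', sl.getD fx ' ', '\x02']], p.2 ++ [['\x01', tl.getD fy ' ', '\x02']])
      else (p.1 ++ [[sl.getD fx ' ']], p.2 ++ [[tl.getD fy ' ']])

-- A's emit loop over the collected path, appending to l1 and l2
def pvEmitA (d : List (List (Nat × Nat × Nat))) (sl tl : List Char) (l : List (Nat × Nat)) :
    List (List Char) × List (List Char) :=
  l.foldl (pvEmitStep d sl tl) ([], [])

def linediff (s t : String) : String × String :=
  let sl := if s.toList.length ≠ 0 then (s.toList.map (fun c => pvSaneA [c])).flatten else s.toList
  let tl := if t.toList.length ≠ 0 then (t.toList.map (fun c => pvSaneA [c])).flatten else t.toList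
  let m := sl.length
  let n := tl.length
  let d := pvDP sl tl m n
  let l := pvPathA d (m + n + 1) (m, n) []
  let p := pvEmitA d sl tl l
  (String.mk (PySem.Chars.replace p.1.flatten ['\x02', '\x01'] []),
   String.mk (PySem.Chars.replace p.2.flatten ['\x02', '\x01'] []))

-- ===== PORT B =====
-- B's per-character sane
def pvSaneCh (c : Char) : Char := if c = '\t' ∨ c = '\n' ∨ 32 ≤ c.toNat then c else '.'

-- B's memo phase: 'while stack: …' with the stack head as Python's list end (the top);
-- the fuel 5^(m+n+1) is proved sufficient below (the Python loop carries no fuel).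
def pvMemoLoop (sl tl : List Char) :
    Nat → List (Nat × Nat) → PySem.Dict (Nat × Nat) Nat → PySem.Dict (Nat × Nat) Nat
  | 0, _, memo => memo
  | _+1, [], memo => memo
  | fuel+1, c :: rest, memo =>
      if memo.contains c then pvMemoLoop sl tl fuel rest memo
      else if c.1 = 0 then pvMemoLoop sl tl fuel rest (memo.insert c c.2)
      else if c.2 = 0 then pvMemoLoop sl tl fuel rest (memo.insert c c.1)
      else
        let deps : List (Nat × Nat) := [(c.1-1, c.2), (c.1, c.2-1), (c.1-1, c.2-1)]
        let missing := deps.filter (fun p => ¬ memo.contains p)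
        if missing.isEmpty then
          let sub : Nat := if sl.getD (c.1-1) ' ' = tl.getD (c.2-1) ' ' then 0 else 1
          pvMemoLoop sl tl fuel rest (memo.insert c
            (Nat.min (Nat.min (memo.getD (c.1-1, c.2) 0 + 1) (memo.getD (c.1, c.2-1) 0 + 1))
                     (memo.getD (c.1-1, c.2-1) 0 + sub)))
        else pvMemoLoop sl tl fuel (missing.reverse ++ c :: rest) memo

-- B's backward walk: classify the step (0=ins, 1=del, 2=copy, 3=sub) and append the
-- token for each side; fuel m+n+1 bounds the walk (each step decreases i+j).
def pvWalkB (memo : PySem.Dict (Nat × Nat) Nat) (sl tl : List Char) :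
    Nat → Nat × Nat → List (Char × Bool) × List (Char × Bool) →
      List (Char × Bool) × List (Char × Bool)
  | 0, _, r => r
  | fuel+1, ij, r =>
      if ij = (0, 0) then r
      else
        let i := ij.1; let j := ij.2
        let kind : Nat :=
          if i = 0 then 0
          else if j = 0 then 1
          else
            let sub : Nat := if sl.getD (i-1) ' ' = tl.getD (j-1) ' ' then 0 else 1
            if memo.getD (i-1, j-1) 0 + sub = memo.getD (i, j) 0 then (if sub = 0 then 2 else 3)
            else if memo.getD (i-1, j) 0 + 1 = memo.getD (i, j) 0 then 1
            else 0
        if kind = 0 then pvWalkB memo sl tl fuel (i, j-1) (r.1, r.2 ++ [(tl.getD (j-1) ' ', true)])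
        else if kind = 1 then pvWalkB memo sl tl fuel (i-1, j) (r.1 ++ [(sl.getD (i-1) ' ', true)], r.2)
        else pvWalkB memo sl tl fuel (i-1, j-1)
          (r.1 ++ [(sl.getD (i-1) ' ', kind == 3)], r.2 ++ [(tl.getD (j-1) ' ', kind == 3)])

-- B's render(): group runs of changed characters, wrapping each finished run once
def pvRenderStep (acc : List (List Char) × List Char) (tc : Char × Bool) :
    List (List Char) × List Char :=
  if tc.2 then (acc.1, acc.2 ++ [tc.1])
  else ((if acc.2.isEmpty then acc.1 else acc.1 ++ ['\x01' :: acc.2 ++ ['\x02']]) ++ [[tc.1]], [])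

def pvRender (ts : List (Char × Bool)) : List Char :=
  let p := ts.foldl pvRenderStep ([], [])
  (if p.2.isEmpty then p.1 else p.1 ++ ['\x01' :: p.2 ++ ['\x02']]).flatten

def linediff_alt (s t : String) : String × String :=
  let sl := s.toList.map pvSaneCh
  let tl := t.toList.map pvSaneCh
  let m := sl.length
  let n := tl.length
  let memo := pvMemoLoop sl tl (5 ^ (m + n + 1)) [(m, n)] PySem.Dict.empty
  let r := pvWalkB memo sl tl (m + n + 1) (m, n) ([], [])
  (String.mk (pvRender r.1.reverse), String.mk (pvRender r.2.reverse))

-- ===== PRECONDITION & SPEC =====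
def Spec_linediff (s : String) (t : String) (out : String × String) : Prop := out = linediff_alt s t
instance (s : String) (t : String) (out : String × String) : Decidable (Spec_linediff s t out) := by unfold Spec_linediff; infer_instance

-- ===== CLAIM (what is proved, stated in full; the proofs are below) =====
def Claim_equal_linediff : Prop := ∀ (s : String) (t : String), Dom_linediff s t → Spec_linediff s t (linediff s t)

-- ===== LEMMAS AND PROOFS =====

-- the common DP cell: (cost, parent) of the Levenshtein matrix with A's exact tie-break
def pvE (sl tl : List Char) : Nat → Nat → Nat × Nat × Nat
  | 0, 0 => (0, 0, 0)
  | i+1, 0 => (i+1, i, 0)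
  | 0, j+1 => (j+1, 0, j)
  | i+1, j+1 =>
      pvMin3 ((pvE sl tl i (j+1)).1 + 1, (i, j+1))
             ((pvE sl tl (i+1) j).1 + 1, (i+1, j))
             ((pvE sl tl i j).1 + (if sl.getD i ' ' = tl.getD j ' ' then 0 else 1), (i, j))
termination_by i j => i + j

lemma pvE_zero_zero (sl tl : List Char) : pvE sl tl 0 0 = (0, 0, 0) := by simp [pvE]

lemma pvE_succ_zero (sl tl : List Char) (i : Nat) : pvE sl tl (i+1) 0 = (i+1, i, 0) := by
  simp [pvE]

lemma pvE_zero_succ (sl tl : List Char) (j : Nat) : pvE sl tl 0 (j+1) = (j+1, 0, j) := by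
  simp [pvE]

lemma pvE_succ_succ (sl tl : List Char) (i j : Nat) :
    pvE sl tl (i+1) (j+1) =
      pvMin3 ((pvE sl tl i (j+1)).1 + 1, (i, j+1))
             ((pvE sl tl (i+1) j).1 + 1, (i+1, j))
             ((pvE sl tl i j).1 + (if sl.getD i ' ' = tl.getD j ' ' then 0 else 1), (i, j)) := by
  rw [pvE]

def pvMk (m n : Nat) (F : Nat → Nat → Nat × Nat × Nat) : List (List (Nat × Nat × Nat)) :=
  (List.range (m+1)).map (fun i => (List.range (n+1)).map (F i))

lemma pvGetM_mk {m n : Nat} {F : Nat → Nat → Nat × Nat × Nat} {i j : Nat}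
    (hi : i ≤ m) (hj : j ≤ n) : pvGetM (pvMk m n F) i j = F i j := by
  unfold pvGetM pvMk
  rw [PySem.List.getD_map_range _ _ _ _ (by omega), PySem.List.getD_map_range _ _ _ _ (by omega)]

lemma pvSet_map_range {β : Type} (f : Nat → β) (a x : Nat) (v : β) (_hx : x < a) :
    ((List.range a).map f).set x v = (List.range a).map (fun i => if i = x then v else f i) := by
  apply List.ext_getElem
  · simp
  · intro k h1 h2
    simp only [List.getElem_set, List.getElem_map, List.getElem_range]
    rcases eq_or_ne x k with h | h
    · simp [h]
    · simp [h, Ne.symm h]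

lemma pvSetM_mk {m n : Nat} {F : Nat → Nat → Nat × Nat × Nat} {x y : Nat}
    (hx : x ≤ m) (hy : y ≤ n) (v : Nat × Nat × Nat) :
    pvSetM (pvMk m n F) x y v = pvMk m n (fun i j => if i = x ∧ j = y then v else F i j) := by
  unfold pvSetM pvMk
  rw [PySem.List.getD_map_range _ _ _ _ (by omega),
      pvSet_map_range _ _ _ _ (by omega),
      pvSet_map_range _ _ _ _ (by omega)]
  apply List.map_congr_left
  intro i hi
  rcases eq_or_ne i x with h | h
  · subst h
    simp only [if_pos]
    apply List.map_congr_left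
    intro j hj
    by_cases hjy : j = y <;> simp [hjy]
  · simp only [if_neg h]
    apply List.map_congr_left
    intro j hj
    simp [h]

lemma pvMk_congr {m n : Nat} {F G : Nat → Nat → Nat × Nat × Nat}
    (h : ∀ i ≤ m, ∀ j ≤ n, F i j = G i j) : pvMk m n F = pvMk m n G := by
  unfold pvMk
  apply List.map_congr_left
  intro i hi
  apply List.map_congr_left
  intro j hj
  exact h i (by simp at hi; omega) j (by simp at hj; omega)

lemma pvMin3_fst (a b c : Nat × Nat × Nat) :
    (pvMin3 a b c).1 = Nat.min (Nat.min a.1 b.1) c.1 := by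
  unfold pvMin3 pvMin2
  split_ifs <;> simp <;> omega

lemma pvMin3_cases (a b c : Nat × Nat × Nat) :
    pvMin3 a b c = a ∨ pvMin3 a b c = b ∨ pvMin3 a b c = c := by
  unfold pvMin3 pvMin2
  split_ifs <;> tauto

-- parent coordinates never grow
lemma pvE_parent_le (sl tl : List Char) (i j : Nat) :
    (pvE sl tl i j).2.1 ≤ i ∧ (pvE sl tl i j).2.2 ≤ j := by
  rcases i with _ | i <;> rcases j with _ | j
  · simp [pvE_zero_zero]
  · simp [pvE_zero_succ]
  · simp [pvE_succ_zero]
  · rw [pvE_succ_succ]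
    rcases pvMin3_cases ((pvE sl tl i (j+1)).1 + 1, (i, j+1))
      ((pvE sl tl (i+1) j).1 + 1, (i+1, j))
      ((pvE sl tl i j).1 + (if sl.getD i ' ' = tl.getD j ' ' then 0 else 1), (i, j)) with h | h | h <;>
      rw [h] <;> simp

-- ===== the A-side matrix equals the cell function everywhere =====

def pvC2 (k i j : Nat) : Nat × Nat × Nat :=
  if 1 ≤ i ∧ i ≤ k ∧ j = 0 then (i, i-1, 0) else (0, 0, 0)

lemma pvStage2 (m n : Nat) : ∀ k, k ≤ m →
    (List.range k).foldl (fun d i0 => pvSetM d (i0+1) 0 (i0+1, i0+1-1, 0))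
      (pvMk m n (fun _ _ => (0, 0, 0))) = pvMk m n (pvC2 k) := by
  intro k
  induction k with
  | zero =>
      intro _
      simp only [List.range_zero, List.foldl_nil]
      exact pvMk_congr (fun i _ j _ => by unfold pvC2; rw [if_neg (by omega)])
  | succ k ih =>
      intro hk
      rw [List.range_succ, List.foldl_append, ih (by omega), List.foldl_cons, List.foldl_nil,
          pvSetM_mk (by omega) (by omega)]
      apply pvMk_congr
      intro i hi j hj
      unfold pvC2
      by_cases h : i = k + 1 ∧ j = 0
      · obtain ⟨h1, h2⟩ := h; subst h1; subst h2; simp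
      · rw [if_neg h]
        split_ifs <;> first | rfl | (exfalso; omega)

def pvC3 (m k i j : Nat) : Nat × Nat × Nat :=
  if i = 0 ∧ 1 ≤ j ∧ j ≤ k then (j, 0, j-1) else pvC2 m i j

lemma pvStage3 (m n : Nat) : ∀ k, k ≤ n →
    (List.range k).foldl (fun d j0 => pvSetM d 0 (j0+1) (j0+1, 0, j0+1-1))
      (pvMk m n (pvC2 m)) = pvMk m n (pvC3 m k) := by
  intro k
  induction k with
  | zero =>
      intro _
      simp only [List.range_zero, List.foldl_nil]
      exact pvMk_congr (fun i _ j _ => by unfold pvC3; rw [if_neg (by omega)])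
  | succ k ih =>
      intro hk
      rw [List.range_succ, List.foldl_append, ih (by omega), List.foldl_cons, List.foldl_nil,
          pvSetM_mk (by omega) (by omega)]
      apply pvMk_congr
      intro i hi j hj
      unfold pvC3 pvC2
      by_cases h : i = 0 ∧ j = k + 1
      · obtain ⟨h1, h2⟩ := h; subst h1; subst h2; simp
      · rw [if_neg h]
        split_ifs <;> first | rfl | (exfalso; omega)

-- cells holding their final value after rows 1..a and, in row a+1, columns 1..b
def pvF (sl tl : List Char) (a b i j : Nat) : Nat × Nat × Nat :=
  if i = 0 ∨ j = 0 ∨ i ≤ a ∨ (i = a + 1 ∧ j ≤ b) then pvE sl tl i j else (0, 0, 0)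

lemma pvC3_eq_pvF (sl tl : List Char) (m n : Nat) :
    pvMk m n (pvC3 m n) = pvMk m n (pvF sl tl 0 0) := by
  apply pvMk_congr
  intro i hi j hj
  unfold pvC3 pvC2 pvF
  rcases i with _ | i <;> rcases j with _ | j
  · rw [if_neg (by omega), if_neg (by omega), if_pos (by omega), pvE_zero_zero]
  · rw [if_pos (by omega), if_pos (by omega), pvE_zero_succ]
    simp
  · rw [if_neg (by omega), if_pos (by omega), if_pos (by omega), pvE_succ_zero]
    simp
  · rw [if_neg (by omega), if_neg (by omega), if_neg (by omega)]

lemma pvStageInner (sl tl : List Char) (m n a : Nat) (ha : a < m) : ∀ b, b ≤ n →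
    (List.range b).foldl (fun d j0 =>
      pvSetM d (a+1) (j0+1)
        (pvMin3 ((pvGetM d (a+1-1) (j0+1)).1 + 1, (a+1-1, j0+1))
                ((pvGetM d (a+1) (j0+1-1)).1 + 1, (a+1, j0+1-1))
                ((pvGetM d (a+1-1) (j0+1-1)).1 +
                  (if sl.getD (a+1-1) ' ' = tl.getD (j0+1-1) ' ' then 0 else 1), (a+1-1, j0+1-1))))
      (pvMk m n (pvF sl tl a 0)) = pvMk m n (pvF sl tl a b) := by
  intro b
  induction b with
  | zero => intro _; simp
  | succ b ih =>
      intro hb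
      rw [List.range_succ, List.foldl_append, ih (by omega)]
      simp only [List.foldl_cons, List.foldl_nil, Nat.add_sub_cancel]
      rw [pvGetM_mk (by omega) (by omega), pvGetM_mk (by omega) (by omega),
          pvGetM_mk (by omega) (by omega)]
      have hA : pvF sl tl a b a (b+1) = pvE sl tl a (b+1) := by
        unfold pvF; split_ifs <;> first | rfl | (exfalso; omega)
      have hB : pvF sl tl a b (a+1) b = pvE sl tl (a+1) b := by
        unfold pvF; split_ifs <;> first | rfl | (exfalso; omega)
      have hC : pvF sl tl a b a b = pvE sl tl a b := by
        unfold pvF; split_ifs <;> first | rfl | (exfalso; omega)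
      rw [hA, hB, hC, pvSetM_mk (by omega) (by omega)]
      apply pvMk_congr
      intro i hi j hj
      by_cases h : i = a + 1 ∧ j = b + 1
      · obtain ⟨h1, h2⟩ := h; subst h1; subst h2
        rw [if_pos (show a + 1 = a + 1 ∧ b + 1 = b + 1 from ⟨rfl, rfl⟩)]
        unfold pvF
        rw [if_pos (show a + 1 = 0 ∨ b + 1 = 0 ∨ a + 1 ≤ a ∨ (a + 1 = a + 1 ∧ b + 1 ≤ b + 1) from by omega),
            pvE_succ_succ]
      · rw [if_neg h]
        unfold pvF
        split_ifs <;> first | rfl | (exfalso; omega)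

lemma pvStageOuter (sl tl : List Char) (m n : Nat) : ∀ k, k ≤ m →
    (List.range k).foldl (fun d i0 =>
      (List.range n).foldl (fun d j0 =>
        pvSetM d (i0+1) (j0+1)
          (pvMin3 ((pvGetM d (i0+1-1) (j0+1)).1 + 1, (i0+1-1, j0+1))
                  ((pvGetM d (i0+1) (j0+1-1)).1 + 1, (i0+1, j0+1-1))
                  ((pvGetM d (i0+1-1) (j0+1-1)).1 +
                    (if sl.getD (i0+1-1) ' ' = tl.getD (j0+1-1) ' ' then 0 else 1),
                   (i0+1-1, j0+1-1)))) d)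
      (pvMk m n (pvF sl tl 0 0)) = pvMk m n (pvF sl tl k 0) := by
  intro k
  induction k with
  | zero => intro _; simp
  | succ k ih =>
      intro hk
      rw [List.range_succ, List.foldl_append, ih (by omega)]
      simp only [List.foldl_cons, List.foldl_nil]
      rw [pvStageInner sl tl m n k (by omega) n le_rfl]
      apply pvMk_congr
      intro i hi j hj
      unfold pvF
      split_ifs <;> first | rfl | (exfalso; omega)

lemma pvDP_eq (sl tl : List Char) (m n : Nat) :
    pvDP sl tl m n = pvMk m n (pvE sl tl) := by
  simp only [pvDP]
  have h0 : ((List.range (m+1)).map (fun _ => (List.range (n+1)).map (fun _ => ((0:Nat), (0:Nat), (0:Nat)))))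
      = pvMk m n (fun _ _ => (0, 0, 0)) := rfl
  rw [h0, pvSetM_mk (by omega) (by omega)]
  have h1 : pvMk m n (fun i j => if i = 0 ∧ j = 0 then ((0:Nat), (0:Nat), (0:Nat)) else (0, 0, 0))
      = pvMk m n (fun _ _ => (0, 0, 0)) :=
    pvMk_congr (by intro i _ j _; split_ifs <;> rfl)
  rw [h1, pvStage2 m n m le_rfl, pvStage3 m n n le_rfl, pvC3_eq_pvF sl tl,
      pvStageOuter sl tl m n m le_rfl]
  apply pvMk_congr
  intro i hi j hj
  unfold pvF
  rw [if_pos (by omega)]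

-- ===== the backward walks =====

-- the coordinates visited by the backward walk, from the common cell function
def pvTrace (sl tl : List Char) : Nat → Nat × Nat → List (Nat × Nat)
  | 0, _ => []
  | fuel+1, c => if c = (0, 0) then [] else c :: pvTrace sl tl fuel (pvE sl tl c.1 c.2).2

lemma pvTrace_bounds (sl tl : List Char) (m n : Nat) :
    ∀ fuel i j, i ≤ m → j ≤ n → ∀ c ∈ pvTrace sl tl fuel (i, j), c.1 ≤ m ∧ c.2 ≤ n := by
  intro fuel
  induction fuel with
  | zero => intro i j _ _ c hc; simp [pvTrace] at hc
  | succ fuel ih =>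
      intro i j hi hj c hc
      rw [pvTrace] at hc
      by_cases h0 : ((i, j) : Nat × Nat) = (0, 0)
      · simp [h0] at hc
      · rw [if_neg h0] at hc
        rcases List.mem_cons.mp hc with h | h
        · subst h; exact ⟨hi, hj⟩
        · obtain ⟨h1, h2⟩ := pvE_parent_le sl tl i j
          have := ih (pvE sl tl i j).2.1 (pvE sl tl i j).2.2 (le_trans h1 hi) (le_trans h2 hj) c
          apply this
          simpa using h

lemma pvPathA_eq (sl tl : List Char) (m n : Nat) :
    ∀ fuel i j acc, i ≤ m → j ≤ n →
      pvPathA (pvMk m n (pvE sl tl)) fuel (i, j) acc =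
        (pvTrace sl tl fuel (i, j)).reverse ++ acc := by
  intro fuel
  induction fuel with
  | zero => intro i j acc _ _; simp [pvPathA, pvTrace]
  | succ fuel ih =>
      intro i j acc hi hj
      rw [pvPathA, pvTrace]
      by_cases h0 : ((i, j) : Nat × Nat) = (0, 0)
      · simp [h0]
      · rw [if_neg h0, if_neg h0]
        rw [pvGetM_mk hi hj]
        obtain ⟨h1, h2⟩ := pvE_parent_le sl tl i j
        rw [show ((pvE sl tl i j).2 : Nat × Nat) = ((pvE sl tl i j).2.1, (pvE sl tl i j).2.2) from rfl]
        rw [ih _ _ _ (le_trans h1 hi) (le_trans h2 hj)]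
        simp

-- the two markup pieces a visited cell contributes (A's emit branches)
def pvP1 (sl tl : List Char) (c : Nat × Nat) : List Char :=
  if (c.1 - (pvE sl tl c.1 c.2).2.1, c.2 - (pvE sl tl c.1 c.2).2.2) = ((0:Nat), (1:Nat)) then []
  else if (c.1 - (pvE sl tl c.1 c.2).2.1, c.2 - (pvE sl tl c.1 c.2).2.2) = ((1:Nat), (0:Nat)) then ['\x01', sl.getD (pvE sl tl c.1 c.2).2.1 ' ', '\x02']
  else if (pvE sl tl c.1 c.2).1 - (pvE sl tl (pvE sl tl c.1 c.2).2.1 (pvE sl tl c.1 c.2).2.2).1 = 1 then ['\x01', sl.getD (pvE sl tl c.1 c.2).2.1 ' ', '\x02']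
  else [sl.getD (pvE sl tl c.1 c.2).2.1 ' ']

def pvP2 (sl tl : List Char) (c : Nat × Nat) : List Char :=
  if (c.1 - (pvE sl tl c.1 c.2).2.1, c.2 - (pvE sl tl c.1 c.2).2.2) = ((0:Nat), (1:Nat)) then ['\x01', tl.getD (pvE sl tl c.1 c.2).2.2 ' ', '\x02']
  else if (c.1 - (pvE sl tl c.1 c.2).2.1, c.2 - (pvE sl tl c.1 c.2).2.2) = ((1:Nat), (0:Nat)) then []
  else if (pvE sl tl c.1 c.2).1 - (pvE sl tl (pvE sl tl c.1 c.2).2.1 (pvE sl tl c.1 c.2).2.2).1 = 1 then ['\x01', tl.getD (pvE sl tl c.1 c.2).2.2 ' ', '\x02']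
  else [tl.getD (pvE sl tl c.1 c.2).2.2 ' ']

lemma pvEmit_fold (sl tl : List Char) (m n : Nat) : ∀ (l : List (Nat × Nat)),
    (∀ c ∈ l, c.1 ≤ m ∧ c.2 ≤ n) → ∀ a b,
    l.foldl (pvEmitStep (pvMk m n (pvE sl tl)) sl tl) (a, b) =
      (a ++ l.map (pvP1 sl tl), b ++ l.map (pvP2 sl tl)) := by
  intro l
  induction l with
  | nil => intro _ a b; simp
  | cons c l ih =>
      intro hb a b
      obtain ⟨hc1, hc2⟩ := hb c (List.mem_cons_self ..)
      obtain ⟨h1, h2⟩ := pvE_parent_le sl tl c.1 c.2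
      have hstep : pvEmitStep (pvMk m n (pvE sl tl)) sl tl (a, b) c =
          (a ++ [pvP1 sl tl c], b ++ [pvP2 sl tl c]) := by
        unfold pvEmitStep pvP1 pvP2
        simp only [pvGetM_mk hc1 hc2]
        simp only [pvGetM_mk (le_trans h1 hc1) (le_trans h2 hc2)]
        simp only [Prod.mk.injEq]
        split_ifs <;> rfl
      rw [List.foldl_cons, hstep, ih (fun x hx => hb x (List.mem_cons_of_mem _ hx)) _ _]
      simp

lemma pvEmit_eq (sl tl : List Char) (m n : Nat) (l : List (Nat × Nat))
    (hb : ∀ c ∈ l, c.1 ≤ m ∧ c.2 ≤ n) :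
    pvEmitA (pvMk m n (pvE sl tl)) sl tl l = (l.map (pvP1 sl tl), l.map (pvP2 sl tl)) := by
  unfold pvEmitA
  simpa using pvEmit_fold sl tl m n l hb [] []

lemma pvSane_eq (L : List Char) :
    (if L.length ≠ 0 then (L.map (fun c => pvSaneA [c])).flatten else L) = L.map pvSaneCh := by
  have hone : ∀ c : Char, pvSaneA [c] = [pvSaneCh c] := by
    intro c
    unfold pvSaneA pvSaneCh
    simp only [List.foldl_cons, List.foldl_nil, List.nil_append]
    by_cases ht : c = '\t' <;> by_cases hn : c = '\n' <;> by_cases h32 : c.toNat < 32 <;>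
      simp [ht, hn, h32]
  have hflat : (L.map (fun c => pvSaneA [c])).flatten = L.map pvSaneCh := by
    induction L with
    | nil => rfl
    | cons c L ih => simp [hone c, ih]
  by_cases h : L.length ≠ 0
  · rw [if_pos h, hflat]
  · rw [if_neg h]
    have : L = [] := by
      cases L
      · rfl
      · simp at h
    simp [this]

-- ===== B side: the memo phase computes pvE costs =====

lemma pvE_fst_left (sl tl : List Char) (j : Nat) : (pvE sl tl 0 j).1 = j := by
  cases j
  · simp [pvE_zero_zero]
  · simp [pvE_zero_succ]

lemma pvE_fst_right (sl tl : List Char) (i : Nat) : (pvE sl tl i 0).1 = i := by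
  cases i
  · simp [pvE_zero_zero]
  · simp [pvE_succ_zero]

-- memo invariant: every stored value is the pvE cost, and every stored interior
-- cell has its three dependencies stored
def pvMemoOK (sl tl : List Char) (memo : PySem.Dict (Nat × Nat) Nat) : Prop :=
  (∀ p v, memo.get? p = some v → v = (pvE sl tl p.1 p.2).1) ∧
  (∀ p : Nat × Nat, (memo.get? p).isSome → p.1 ≠ 0 → p.2 ≠ 0 →
    (memo.get? (p.1-1, p.2)).isSome ∧ (memo.get? (p.1, p.2-1)).isSome ∧
    (memo.get? (p.1-1, p.2-1)).isSome)

lemma pvDictMono {v : Nat} (memo : PySem.Dict (Nat × Nat) Nat) (c : Nat × Nat)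
    (hnone : memo.get? c = none) :
    ∀ p w, memo.get? p = some w → (memo.insert c v).get? p = some w := by
  intro p w hp
  rw [PySem.Dict.get?_insert]
  split_ifs with h
  · subst h; rw [hnone] at hp; cases hp
  · exact hp

lemma pvDictSome {v : Nat} (memo : PySem.Dict (Nat × Nat) Nat) (c p : Nat × Nat)
    (hp : (memo.get? p).isSome) : ((memo.insert c v).get? p).isSome := by
  rw [PySem.Dict.get?_insert]
  split_ifs
  · simp
  · exact hp

lemma pvMemoOK_insert (sl tl : List Char) (memo : PySem.Dict (Nat × Nat) Nat)
    (hok : pvMemoOK sl tl memo) (c : Nat × Nat) (v : Nat) (hval : v = (pvE sl tl c.1 c.2).1)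
    (hclosed : c.1 ≠ 0 → c.2 ≠ 0 →
      ((memo.get? (c.1-1, c.2)).isSome ∧ (memo.get? (c.1, c.2-1)).isSome ∧
       (memo.get? (c.1-1, c.2-1)).isSome)) :
    pvMemoOK sl tl (memo.insert c v) := by
  constructor
  · intro p w hp
    rw [PySem.Dict.get?_insert] at hp
    split_ifs at hp with h
    · cases hp; subst h; exact hval
    · exact hok.1 p w hp
  · intro p hp h1 h2
    rw [PySem.Dict.get?_insert] at hp
    split_ifs at hp with h
    · subst h
      obtain ⟨q1, q2, q3⟩ := hclosed h1 h2
      exact ⟨pvDictSome _ _ _ q1, pvDictSome _ _ _ q2, pvDictSome _ _ _ q3⟩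
    · obtain ⟨q1, q2, q3⟩ := hok.2 p hp h1 h2
      exact ⟨pvDictSome _ _ _ q1, pvDictSome _ _ _ q2, pvDictSome _ _ _ q3⟩

-- the value the compute branch inserts is the pvE cost
lemma pvMemo_value (sl tl : List Char) (memo : PySem.Dict (Nat × Nat) Nat)
    (hok : pvMemoOK sl tl memo) (a b : Nat)
    (hu : (memo.get? (a, b+1)).isSome) (hl : (memo.get? (a+1, b)).isSome)
    (hd : (memo.get? (a, b)).isSome) :
    Nat.min (Nat.min (memo.getD (a, b+1) 0 + 1) (memo.getD (a+1, b) 0 + 1))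
        (memo.getD (a, b) 0 + (if sl.getD a ' ' = tl.getD b ' ' then 0 else 1))
      = (pvE sl tl (a+1) (b+1)).1 := by
  obtain ⟨uv, huv⟩ := Option.isSome_iff_exists.mp hu
  obtain ⟨lv, hlv⟩ := Option.isSome_iff_exists.mp hl
  obtain ⟨dv, hdv⟩ := Option.isSome_iff_exists.mp hd
  rw [PySem.Dict.getD_of_get?_eq_some memo 0 huv, PySem.Dict.getD_of_get?_eq_some memo 0 hlv,
      PySem.Dict.getD_of_get?_eq_some memo 0 hdv, hok.1 _ _ huv, hok.1 _ _ hlv, hok.1 _ _ hdv,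
      pvE_succ_succ, pvMin3_fst]

lemma pvMemo_main (sl tl : List Char) : ∀ d : Nat, ∀ c : Nat × Nat, c.1 + c.2 ≤ d →
    ∀ rest memo fuel, pvMemoOK sl tl memo → 5 ^ (d+1) ≤ fuel →
    ∃ memo' fuel', pvMemoLoop sl tl fuel (c :: rest) memo = pvMemoLoop sl tl fuel' rest memo'
      ∧ pvMemoOK sl tl memo'
      ∧ (∀ p v, memo.get? p = some v → memo'.get? p = some v)
      ∧ memo'.get? c = some ((pvE sl tl c.1 c.2).1)
      ∧ fuel - 5 ^ (d+1) ≤ fuel' := by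
  intro d
  induction d with
  | zero =>
      intro c hc rest memo fuel hok hfuel
      obtain ⟨c1, c2⟩ := c
      simp only [] at hc
      have hc1 : c1 = 0 := by omega
      have hc2 : c2 = 0 := by omega
      subst hc1; subst hc2
      obtain ⟨f, rfl⟩ : ∃ f, fuel = f + 1 :=
        ⟨fuel - 1, by have : (0:Nat) < fuel := by calc 0 < 5^1 := by norm_num
                                                    _ ≤ fuel := hfuel
                      omega⟩
      by_cases hmem : memo.contains (0, 0)
      · have hsome : (memo.get? ((0:Nat), (0:Nat))).isSome := by
          rw [← PySem.Dict.contains_eq_isSome_get?, hmem]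
        obtain ⟨v, hv⟩ := Option.isSome_iff_exists.mp hsome
        refine ⟨memo, f, ?_, hok, fun p w hp => hp, ?_, by omega⟩
        · rw [pvMemoLoop, if_pos hmem]
        · rw [hv, hok.1 _ _ hv]
      · have hnone : memo.get? ((0:Nat), (0:Nat)) = none :=
          (PySem.Dict.get?_eq_none_iff_contains memo _).mpr (by simpa using hmem)
        refine ⟨memo.insert (0, 0) 0, f, ?_, ?_, pvDictMono memo _ hnone, ?_, by omega⟩
        · rw [pvMemoLoop, if_neg hmem, if_pos rfl]
        · exact pvMemoOK_insert sl tl memo hok (0, 0) 0 (by rw [pvE_zero_zero])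
            (fun h _ => absurd rfl h)
        · rw [PySem.Dict.get?_insert_self, pvE_zero_zero]
  | succ d ihd =>
      intro c hc rest memo fuel hok hfuel
      obtain ⟨c1, c2⟩ := c
      have h5d : (0:Nat) < 5 ^ d := by positivity
      have h5 : (0:Nat) < 5 ^ (d+1) := by positivity
      have hpow : (5:Nat) ^ (d+1+1) = 5 * 5 ^ (d+1) := by ring
      have hfuel1 : (0:Nat) < fuel := by
        calc (0:Nat) < 5^(d+2) := pow_pos (by norm_num) _
          _ ≤ fuel := hfuel
      obtain ⟨f, rfl⟩ : ∃ f, fuel = f + 1 := ⟨fuel - 1, by omega⟩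
      by_cases hmem : memo.contains (c1, c2)
      · have hsome : (memo.get? (c1, c2)).isSome := by
          rw [← PySem.Dict.contains_eq_isSome_get?, hmem]
        obtain ⟨v, hv⟩ := Option.isSome_iff_exists.mp hsome
        refine ⟨memo, f, ?_, hok, fun p w hp => hp, ?_, by omega⟩
        · rw [pvMemoLoop, if_pos hmem]
        · rw [hv, hok.1 _ _ hv]
      · have hnone : memo.get? (c1, c2) = none :=
          (PySem.Dict.get?_eq_none_iff_contains memo _).mpr (by simpa using hmem)
        rcases Nat.eq_zero_or_eq_succ_pred c1 with hc1 | hc1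
        · -- first row
          subst hc1
          refine ⟨memo.insert (0, c2) c2, f, ?_, ?_, pvDictMono memo _ hnone, ?_, by omega⟩
          · rw [pvMemoLoop, if_neg hmem, if_pos rfl]
          · exact pvMemoOK_insert sl tl memo hok (0, c2) c2 (by rw [pvE_fst_left])
              (fun h _ => absurd rfl h)
          · rw [PySem.Dict.get?_insert_self, pvE_fst_left]
        · rcases Nat.eq_zero_or_eq_succ_pred c2 with hc2 | hc2
          · -- first column
            subst hc2
            have hc1' : c1 ≠ 0 := by rw [hc1]; exact Nat.succ_ne_zero _
            refine ⟨memo.insert (c1, 0) c1, f, ?_, ?_, pvDictMono memo _ hnone, ?_, by omega⟩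
            · rw [pvMemoLoop, if_neg hmem, if_neg hc1', if_pos rfl]
            · exact pvMemoOK_insert sl tl memo hok (c1, 0) c1 (by rw [pvE_fst_right])
                (fun _ h => absurd rfl h)
            · rw [PySem.Dict.get?_insert_self, pvE_fst_right]
          · -- interior cell
            obtain ⟨a, rfl⟩ : ∃ a, c1 = a + 1 := ⟨c1 - 1, by omega⟩
            obtain ⟨b, rfl⟩ : ∃ b, c2 = b + 1 := ⟨c2 - 1, by omega⟩
            simp only [] at hc
            -- the list of cells below/left of c that the loop may need
            by_cases hmiss :
                ([((a:Nat), (b:Nat)+1), ((a:Nat)+1, (b:Nat)), ((a:Nat), (b:Nat))].filter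
                  (fun p => ¬ memo.contains p)) = []
            · -- all dependencies present: compute
              have hdeps : ∀ p ∈ [((a:Nat), (b:Nat)+1), ((a:Nat)+1, (b:Nat)), ((a:Nat), (b:Nat))],
                  (memo.get? p).isSome := by
                intro p hp
                have := List.filter_eq_nil_iff.mp hmiss p hp
                rw [← PySem.Dict.contains_eq_isSome_get?]
                simpa using this
              have hu := hdeps (a, b+1) (by simp)
              have hl2 := hdeps (a+1, b) (by simp)
              have hd2 := hdeps (a, b) (by simp)
              refine ⟨memo.insert (a+1, b+1)
                  (Nat.min (Nat.min (memo.getD (a, b+1) 0 + 1) (memo.getD (a+1, b) 0 + 1))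
                    (memo.getD (a, b) 0 + (if sl.getD a ' ' = tl.getD b ' ' then 0 else 1))),
                f, ?_, ?_, pvDictMono memo _ hnone, ?_, by omega⟩
              · rw [pvMemoLoop, if_neg hmem, if_neg (Nat.succ_ne_zero a), if_neg (Nat.succ_ne_zero b)]
                simp only [Nat.add_sub_cancel]
                rw [if_pos (by rw [List.isEmpty_iff]; exact hmiss)]
              · exact pvMemoOK_insert sl tl memo hok (a+1, b+1) _
                  (by simp only []
                      rw [pvMemo_value sl tl memo hok a b hu hl2 hd2])
                  (fun _ _ => by simp only [Nat.add_sub_cancel]; exact ⟨hu, hl2, hd2⟩)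
              · rw [PySem.Dict.get?_insert_self, pvMemo_value sl tl memo hok a b hu hl2 hd2]
            · -- push the missing dependencies
              set deps : List (Nat × Nat) := [((a:Nat), (b:Nat)+1), ((a:Nat)+1, (b:Nat)), ((a:Nat), (b:Nat))] with hdeps
              set missing := deps.filter (fun p => ¬ memo.contains p) with hmissing
              have hstep : pvMemoLoop sl tl (f+1) ((a+1, b+1) :: rest) memo =
                  pvMemoLoop sl tl f (missing.reverse ++ (a+1, b+1) :: rest) memo := by
                rw [pvMemoLoop, if_neg hmem, if_neg (Nat.succ_ne_zero a), if_neg (Nat.succ_ne_zero b)]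
                simp only [Nat.add_sub_cancel]
                rw [if_neg (by rw [List.isEmpty_iff]; exact hmiss)]
              -- process the (at most three) missing cells, all of strictly smaller index sum
              have hsmall : ∀ x ∈ missing.reverse, x.1 + x.2 ≤ d := by
                intro x hx
                rw [List.mem_reverse] at hx
                have hx' := List.mem_of_mem_filter hx
                rw [hdeps] at hx'
                simp only [List.mem_cons, List.not_mem_nil, or_false] at hx'
                rcases hx' with h | h | h <;> subst h <;> simp only [] <;> omega
              have hlen : missing.reverse.length ≤ 3 := by
                rw [List.length_reverse, hmissing]
                calc (deps.filter _).length ≤ deps.length := List.length_filter_le _ _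
                  _ = 3 := by rw [hdeps]; rfl
              have hlist : ∀ (L : List (Nat × Nat)), (∀ x ∈ L, x.1 + x.2 ≤ d) →
                  ∀ rest' memo' fuel', pvMemoOK sl tl memo' → L.length * 5^(d+1) ≤ fuel' →
                  ∃ memo'' fuel'',
                    pvMemoLoop sl tl fuel' (L ++ rest') memo' = pvMemoLoop sl tl fuel'' rest' memo''
                    ∧ pvMemoOK sl tl memo''
                    ∧ (∀ p v, memo'.get? p = some v → memo''.get? p = some v)
                    ∧ (∀ x ∈ L, (memo''.get? x).isSome)
                    ∧ fuel' - L.length * 5^(d+1) ≤ fuel'' := by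
                intro L
                induction L with
                | nil =>
                    intro _ rest' memo' fuel' hok' _
                    exact ⟨memo', fuel', rfl, hok', fun p v hp => hp, by simp, by omega⟩
                | cons x L ihL =>
                    intro hL rest' memo' fuel' hok' hfuel'
                    obtain ⟨memo₁, fuel₁, he1, hok1, hmono1, hx1, hf1⟩ :=
                      ihd x (hL x (List.mem_cons_self ..)) (L ++ rest') memo' fuel' hok'
                        (by have hmul : (L.length + 1) * 5^(d+1) = L.length * 5^(d+1) + 5^(d+1) := by ring
                            simp only [List.length_cons] at hfuel'
                            omega)
                    obtain ⟨memo₂, fuel₂, he2, hok2, hmono2, hx2, hf2⟩ :=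
                      ihL (fun y hy => hL y (List.mem_cons_of_mem _ hy)) rest' memo₁ fuel₁ hok1
                        (by have hmul : (L.length + 1) * 5^(d+1) = L.length * 5^(d+1) + 5^(d+1) := by ring
                            simp only [List.length_cons] at hfuel'
                            omega)
                    refine ⟨memo₂, fuel₂, ?_, hok2, fun p v hp => hmono2 p v (hmono1 p v hp), ?_, ?_⟩
                    · rw [List.cons_append, he1, he2]
                    · intro y hy
                      rcases List.mem_cons.mp hy with h | h
                      · subst h
                        rw [Option.isSome_iff_exists]
                        exact ⟨_, hmono2 _ _ hx1⟩
                      · exact hx2 y h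
                    · have hmul : (L.length + 1) * 5^(d+1) = L.length * 5^(d+1) + 5^(d+1) := by ring
                      simp only [List.length_cons] at hfuel' ⊢
                      omega
              obtain ⟨memo₁, fuel₁, he1, hok1, hmono1, hsome1, hf1⟩ :=
                hlist missing.reverse hsmall ((a+1, b+1) :: rest) memo f hok
                  (by have h3 : missing.reverse.length * 5^(d+1) ≤ 3 * 5^(d+1) :=
                        Nat.mul_le_mul_right _ hlen
                      omega)
              have hfuel2 : (0:Nat) < fuel₁ := by
                have h3 : missing.reverse.length * 5^(d+1) ≤ 3 * 5^(d+1) :=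
                  Nat.mul_le_mul_right _ hlen
                omega
              obtain ⟨f₁, rfl⟩ : ∃ f₁, fuel₁ = f₁ + 1 := ⟨fuel₁ - 1, by omega⟩
              -- every dependency is now memoised
              have hdepsome : ∀ p ∈ deps, (memo₁.get? p).isSome := by
                intro p hp
                by_cases hpm : memo.contains p
                · have : (memo.get? p).isSome := by rw [← PySem.Dict.contains_eq_isSome_get?, hpm]
                  obtain ⟨w, hw⟩ := Option.isSome_iff_exists.mp this
                  rw [Option.isSome_iff_exists]
                  exact ⟨w, hmono1 p w hw⟩
                · exact hsome1 p (by
                    rw [List.mem_reverse, hmissing]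
                    rw [List.mem_filter]
                    exact ⟨hp, by simpa using hpm⟩)
              have hu := hdepsome (a, b+1) (by rw [hdeps]; simp)
              have hl2 := hdepsome (a+1, b) (by rw [hdeps]; simp)
              have hd2 := hdepsome (a, b) (by rw [hdeps]; simp)
              by_cases hmem1 : memo₁.contains (a+1, b+1)
              · have hsome : (memo₁.get? (a+1, b+1)).isSome := by
                  rw [← PySem.Dict.contains_eq_isSome_get?, hmem1]
                obtain ⟨v, hv⟩ := Option.isSome_iff_exists.mp hsome
                refine ⟨memo₁, f₁, ?_, hok1, hmono1, ?_, ?_⟩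
                · rw [hstep, he1, pvMemoLoop, if_pos hmem1]
                · rw [hv, hok1.1 _ _ hv]
                · have h3 : missing.reverse.length * 5^(d+1) ≤ 3 * 5^(d+1) :=
                    Nat.mul_le_mul_right _ hlen
                  omega
              · have hnone1 : memo₁.get? (a+1, b+1) = none :=
                  (PySem.Dict.get?_eq_none_iff_contains memo₁ _).mpr (by simpa using hmem1)
                have hmiss1 : deps.filter (fun p => ¬ memo₁.contains p) = [] := by
                  rw [List.filter_eq_nil_iff]
                  intro p hp
                  have := hdepsome p hp
                  rw [← PySem.Dict.contains_eq_isSome_get?] at this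
                  simp [this]
                refine ⟨memo₁.insert (a+1, b+1)
                    (Nat.min (Nat.min (memo₁.getD (a, b+1) 0 + 1) (memo₁.getD (a+1, b) 0 + 1))
                      (memo₁.getD (a, b) 0 + (if sl.getD a ' ' = tl.getD b ' ' then 0 else 1))),
                  f₁, ?_, ?_, ?_, ?_, ?_⟩
                · rw [hstep, he1, pvMemoLoop, if_neg hmem1, if_neg (Nat.succ_ne_zero a),
                      if_neg (Nat.succ_ne_zero b)]
                  simp only [Nat.add_sub_cancel]
                  rw [if_pos (by rw [List.isEmpty_iff]; rw [hdeps] at hmiss1; exact hmiss1)]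
                · exact pvMemoOK_insert sl tl memo₁ hok1 (a+1, b+1) _
                    (by simp only []
                        rw [pvMemo_value sl tl memo₁ hok1 a b hu hl2 hd2])
                    (fun _ _ => by simp only [Nat.add_sub_cancel]; exact ⟨hu, hl2, hd2⟩)
                · exact fun p v hp => pvDictMono memo₁ _ hnone1 p v (hmono1 p v hp)
                · rw [PySem.Dict.get?_insert_self, pvMemo_value sl tl memo₁ hok1 a b hu hl2 hd2]
                · have h3 : missing.reverse.length * 5^(d+1) ≤ 3 * 5^(d+1) :=
                    Nat.mul_le_mul_right _ hlen
                  omega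

lemma pvMemoLoop_nil (sl tl : List Char) (fuel : Nat) (memo : PySem.Dict (Nat × Nat) Nat) :
    pvMemoLoop sl tl fuel [] memo = memo := by
  cases fuel <;> rfl

-- ===== B side: tokens of the walk =====

def pvTok1 (sl tl : List Char) (c : Nat × Nat) : Option (Char × Bool) :=
  if (c.1 - (pvE sl tl c.1 c.2).2.1, c.2 - (pvE sl tl c.1 c.2).2.2) = ((0:Nat), (1:Nat)) then none
  else if (c.1 - (pvE sl tl c.1 c.2).2.1, c.2 - (pvE sl tl c.1 c.2).2.2) = ((1:Nat), (0:Nat)) then some (sl.getD (pvE sl tl c.1 c.2).2.1 ' ', true)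
  else if (pvE sl tl c.1 c.2).1 - (pvE sl tl (pvE sl tl c.1 c.2).2.1 (pvE sl tl c.1 c.2).2.2).1 = 1 then some (sl.getD (pvE sl tl c.1 c.2).2.1 ' ', true)
  else some (sl.getD (pvE sl tl c.1 c.2).2.1 ' ', false)

def pvTok2 (sl tl : List Char) (c : Nat × Nat) : Option (Char × Bool) :=
  if (c.1 - (pvE sl tl c.1 c.2).2.1, c.2 - (pvE sl tl c.1 c.2).2.2) = ((0:Nat), (1:Nat)) then some (tl.getD (pvE sl tl c.1 c.2).2.2 ' ', true)
  else if (c.1 - (pvE sl tl c.1 c.2).2.1, c.2 - (pvE sl tl c.1 c.2).2.2) = ((1:Nat), (0:Nat)) then none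
  else if (pvE sl tl c.1 c.2).1 - (pvE sl tl (pvE sl tl c.1 c.2).2.1 (pvE sl tl c.1 c.2).2.2).1 = 1 then some (tl.getD (pvE sl tl c.1 c.2).2.2 ' ', true)
  else some (tl.getD (pvE sl tl c.1 c.2).2.2 ' ', false)

-- which parent A's lexicographic min picks among the three candidates
lemma pvMin3_snd (uv lv dv a b : Nat) :
    (pvMin3 (uv, (a, b+1)) (lv, (a+1, b)) (dv, (a, b))).2 =
      if dv ≤ uv ∧ dv ≤ lv then (a, b) else if uv ≤ lv then (a, b+1) else (a+1, b) := by
  unfold pvMin3 pvMin2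
  split_ifs <;> first | rfl | (exfalso; omega) | (simp_all; omega)

lemma pvWalkB_eq (sl tl : List Char) (memo : PySem.Dict (Nat × Nat) Nat)
    (hok : pvMemoOK sl tl memo) :
    ∀ fuel i j r1 r2, ((i ≠ 0 ∧ j ≠ 0) → (memo.get? (i, j)).isSome) →
      pvWalkB memo sl tl fuel (i, j) (r1, r2) =
        (r1 ++ (pvTrace sl tl fuel (i, j)).filterMap (pvTok1 sl tl),
         r2 ++ (pvTrace sl tl fuel (i, j)).filterMap (pvTok2 sl tl)) := by
  intro fuel
  induction fuel with
  | zero => intro i j r1 r2 _; simp [pvWalkB, pvTrace]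
  | succ fuel ih =>
    intro i j r1 r2 hmem
    by_cases h0 : ((i, j) : Nat × Nat) = (0, 0)
    · simp [pvWalkB, pvTrace, h0]
    · rw [pvTrace, if_neg h0]
      rcases hi0 : i with _ | a
      · -- i = 0, j = b+1 : forced insert
        subst hi0
        rcases hj0 : j with _ | b
        · exact absurd (by simp [hj0]) h0
        · subst hj0
          have hpar : (pvE sl tl 0 (b+1)).2 = ((0 : Nat), b) := by rw [pvE_zero_succ]
          have ht1 : pvTok1 sl tl (0, b+1) = none := by
            unfold pvTok1
            rw [if_pos]
            simp [hpar]
          have ht2 : pvTok2 sl tl (0, b+1) = some (tl.getD b ' ', true) := by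
            unfold pvTok2
            rw [if_pos]
            · simp [hpar]
            · simp [hpar]
          have hstep : pvWalkB memo sl tl (fuel+1) (0, b+1) (r1, r2) =
              pvWalkB memo sl tl fuel (0, b) (r1, r2 ++ [(tl.getD b ' ', true)]) := by
            rw [pvWalkB, if_neg h0]
            simp
          rw [hstep, ih 0 b r1 (r2 ++ [(tl.getD b ' ', true)]) (by intro h; exact absurd rfl h.1)]
          rw [List.filterMap_cons, ht1, List.filterMap_cons, ht2, hpar]
          simp
      · rcases hj0 : j with _ | b
        · -- j = 0, i = a+1 : forced delete
          subst hi0 hj0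
          have hpar : (pvE sl tl (a+1) 0).2 = (a, (0 : Nat)) := by rw [pvE_succ_zero]
          have ht1 : pvTok1 sl tl (a+1, 0) = some (sl.getD a ' ', true) := by
            unfold pvTok1
            rw [if_neg, if_pos] <;> simp [hpar]
          have ht2 : pvTok2 sl tl (a+1, 0) = none := by
            unfold pvTok2
            rw [if_neg, if_pos] <;> simp [hpar]
          have hstep : pvWalkB memo sl tl (fuel+1) (a+1, 0) (r1, r2) =
              pvWalkB memo sl tl fuel (a, 0) (r1 ++ [(sl.getD a ' ', true)], r2) := by
            rw [pvWalkB, if_neg h0]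
            simp
          rw [hstep, ih a 0 (r1 ++ [(sl.getD a ' ', true)]) r2 (by intro h; exact absurd rfl h.2)]
          rw [List.filterMap_cons, ht1, List.filterMap_cons, ht2, hpar]
          simp
        · -- interior cell
          subst hi0 hj0
          simp only []
          obtain ⟨v, hv⟩ := Option.isSome_iff_exists.mp (hmem ⟨Nat.succ_ne_zero a, Nat.succ_ne_zero b⟩)
          have hvv : v = (pvE sl tl (a+1) (b+1)).1 := hok.1 _ _ hv
          obtain ⟨hu, hl, hd⟩ := hok.2 (a+1, b+1) (by simp [hv]) (Nat.succ_ne_zero a) (Nat.succ_ne_zero b)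
          obtain ⟨uv, huv⟩ := Option.isSome_iff_exists.mp hu
          obtain ⟨lv, hlv⟩ := Option.isSome_iff_exists.mp hl
          obtain ⟨dv, hdv⟩ := Option.isSome_iff_exists.mp hd
          simp only [Nat.add_sub_cancel] at huv hlv hdv
          have huv' : uv = (pvE sl tl a (b+1)).1 := hok.1 _ _ huv
          have hlv' : lv = (pvE sl tl (a+1) b).1 := hok.1 _ _ hlv
          have hdv' : dv = (pvE sl tl a b).1 := hok.1 _ _ hdv
          have hval : (pvE sl tl (a+1) (b+1)).1 =
              Nat.min (Nat.min ((pvE sl tl a (b+1)).1 + 1) ((pvE sl tl (a+1) b).1 + 1))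
                ((pvE sl tl a b).1 + (if sl.getD a ' ' = tl.getD b ' ' then 0 else 1)) := by
            rw [pvE_succ_succ, pvMin3_fst]
          have hpar : (pvE sl tl (a+1) (b+1)).2 =
              (if (pvE sl tl a b).1 + (if sl.getD a ' ' = tl.getD b ' ' then 0 else 1) ≤ (pvE sl tl a (b+1)).1 + 1
                  ∧ (pvE sl tl a b).1 + (if sl.getD a ' ' = tl.getD b ' ' then 0 else 1) ≤ (pvE sl tl (a+1) b).1 + 1
               then (a, b)
               else if (pvE sl tl a (b+1)).1 + 1 ≤ (pvE sl tl (a+1) b).1 + 1 then (a, b+1) else (a+1, b)) := by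
            rw [pvE_succ_succ, pvMin3_snd]
          have hgv : memo.getD (a+1, b+1) 0 = (pvE sl tl (a+1) (b+1)).1 :=
            by rw [PySem.Dict.getD_of_get?_eq_some memo 0 hv, hvv]
          have hgu : memo.getD (a, b+1) 0 = (pvE sl tl a (b+1)).1 :=
            by rw [PySem.Dict.getD_of_get?_eq_some memo 0 huv, huv']
          have hgl : memo.getD (a+1, b) 0 = (pvE sl tl (a+1) b).1 :=
            by rw [PySem.Dict.getD_of_get?_eq_some memo 0 hlv, hlv']
          have hgd : memo.getD (a, b) 0 = (pvE sl tl a b).1 :=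
            by rw [PySem.Dict.getD_of_get?_eq_some memo 0 hdv, hdv']
          set U := (pvE sl tl a (b+1)).1 with hU
          set L := (pvE sl tl (a+1) b).1 with hL
          set D := (pvE sl tl a b).1 with hD
          set sub : Nat := if sl.getD a ' ' = tl.getD b ' ' then 0 else 1 with hsub
          have hsub2 : sub < 2 := by rw [hsub]; split_ifs <;> omega
          have hm1 : ((U+1).min (L+1)).min (D+sub) ≤ U+1 :=
            le_trans (Nat.min_le_left _ _) (Nat.min_le_left _ _)
          have hm2 : ((U+1).min (L+1)).min (D+sub) ≤ L+1 :=
            le_trans (Nat.min_le_left _ _) (Nat.min_le_right _ _)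
          have hm3 : ((U+1).min (L+1)).min (D+sub) ≤ D+sub := Nat.min_le_right _ _
          have hm4 : ((U+1).min (L+1)).min (D+sub) = U+1 ∨
              ((U+1).min (L+1)).min (D+sub) = L+1 ∨ ((U+1).min (L+1)).min (D+sub) = D+sub := by
            simp only [show ∀ x y : Nat, Nat.min x y = min x y from fun _ _ => rfl]
            rcases min_choice (min (U+1) (L+1)) (D+sub) with h | h
            · rcases min_choice (U+1) (L+1) with h2 | h2 <;> rw [h, h2] <;> tauto
            · tauto
          have ha1 : (a+1) - a = 1 := by omega
          have hb1 : (b+1) - b = 1 := by omega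
          have hFa : (((a:Nat)+1) = 0) = False := eq_false (Nat.succ_ne_zero a)
          have hFb : (((b:Nat)+1) = 0) = False := eq_false (Nat.succ_ne_zero b)
          by_cases hdiag : D + sub ≤ U + 1 ∧ D + sub ≤ L + 1
          · -- diagonal parent
            have hMeq : ((U+1).min (L+1)).min (D+sub) = D + sub :=
              le_antisymm hm3 (Nat.le_min.mpr ⟨Nat.le_min.mpr ⟨hdiag.1, hdiag.2⟩, le_rfl⟩)
            have hC1 : (memo.getD (a, b) 0 +
                (if sl.getD a ' ' = tl.getD b ' ' then (0:Nat) else 1) = memo.getD (a+1, b+1) 0)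
                = True := by
              rw [hgd, hgv, hval, ← hsub]
              exact eq_true (by omega)
            have hpar' : (pvE sl tl (a+1) (b+1)).2 = (a, b) := by rw [hpar, if_pos hdiag]
            have hdiff : (pvE sl tl (a+1) (b+1)).1 - D = sub := by
              rw [hval]; omega
            have hnext : (memo.get? (a, b)).isSome := by simp [hdv]
            rcases (by omega : sub = 0 ∨ sub = 1) with hs | hs
            · have ht1 : pvTok1 sl tl (a+1, b+1) = some (sl.getD a ' ', false) := by
                simp only [pvTok1, hpar', ← hD, hdiff, hs, ha1, hb1]
                simp
              have ht2 : pvTok2 sl tl (a+1, b+1) = some (tl.getD b ' ', false) := by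
                simp only [pvTok2, hpar', ← hD, hdiff, hs, ha1, hb1]
                simp
              have hCS : ((if sl.getD a ' ' = tl.getD b ' ' then (0:Nat) else 1) = 0) = True := by
                rw [← hsub]; exact eq_true hs
              have hstep : pvWalkB memo sl tl (fuel+1) (a+1, b+1) (r1, r2) =
                  pvWalkB memo sl tl fuel (a, b)
                    (r1 ++ [(sl.getD a ' ', false)], r2 ++ [(tl.getD b ' ', false)]) := by
                rw [pvWalkB, if_neg h0]
                simp only [Nat.add_sub_cancel, hFa, hFb, hC1, hCS, if_true, if_false,
                  show (((2:Nat)) = 0) = False from by simp,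
                  show (((2:Nat)) = 1) = False from by simp,
                  show (((2:Nat)) == 3) = false from by decide]
              rw [hstep, ih a b _ _ (fun _ => hnext)]
              rw [List.filterMap_cons, ht1, List.filterMap_cons, ht2, hpar']
              simp
            · have ht1 : pvTok1 sl tl (a+1, b+1) = some (sl.getD a ' ', true) := by
                simp only [pvTok1, hpar', ← hD, hdiff, hs, ha1, hb1]
                simp
              have ht2 : pvTok2 sl tl (a+1, b+1) = some (tl.getD b ' ', true) := by
                simp only [pvTok2, hpar', ← hD, hdiff, hs, ha1, hb1]
                simp
              have hCS : ((if sl.getD a ' ' = tl.getD b ' ' then (0:Nat) else 1) = 0) = False := by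
                rw [← hsub]
                exact eq_false (by omega)
              have hstep : pvWalkB memo sl tl (fuel+1) (a+1, b+1) (r1, r2) =
                  pvWalkB memo sl tl fuel (a, b)
                    (r1 ++ [(sl.getD a ' ', true)], r2 ++ [(tl.getD b ' ', true)]) := by
                rw [pvWalkB, if_neg h0]
                simp only [Nat.add_sub_cancel, hFa, hFb, hC1, hCS, if_true, if_false,
                  show (((3:Nat)) = 0) = False from by simp,
                  show (((3:Nat)) = 1) = False from by simp,
                  show (((3:Nat)) == 3) = true from by decide]
              rw [hstep, ih a b _ _ (fun _ => hnext)]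
              rw [List.filterMap_cons, ht1, List.filterMap_cons, ht2, hpar']
              simp
          · have hC1 : (memo.getD (a, b) 0 +
                (if sl.getD a ' ' = tl.getD b ' ' then (0:Nat) else 1) = memo.getD (a+1, b+1) 0)
                = False := by
              rw [hgd, hgv, hval, ← hsub]
              exact eq_false (by omega)
            by_cases hup : U + 1 ≤ L + 1
            · -- up parent (delete)
              have hC2 : (memo.getD (a, b+1) 0 + 1 = memo.getD (a+1, b+1) 0) = True := by
                rw [hgu, hgv, hval]
                exact eq_true (by rcases hm4 with h | h | h <;> omega)
              have hpar' : (pvE sl tl (a+1) (b+1)).2 = (a, b+1) := by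
                rw [hpar, if_neg hdiag, if_pos hup]
              have ht1 : pvTok1 sl tl (a+1, b+1) = some (sl.getD a ' ', true) := by
                simp only [pvTok1, hpar', ha1]
                simp
              have ht2 : pvTok2 sl tl (a+1, b+1) = none := by
                simp only [pvTok2, hpar', ha1]
                simp
              have hnext : (memo.get? (a, b+1)).isSome := by simp [huv]
              have hstep : pvWalkB memo sl tl (fuel+1) (a+1, b+1) (r1, r2) =
                  pvWalkB memo sl tl fuel (a, b+1) (r1 ++ [(sl.getD a ' ', true)], r2) := by
                rw [pvWalkB, if_neg h0]
                simp only [Nat.add_sub_cancel, hFa, hFb, hC1, hC2, if_true, if_false,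
                  show (((1:Nat)) = 0) = False from by simp]
              rw [hstep, ih a (b+1) _ _ (fun _ => hnext)]
              rw [List.filterMap_cons, ht1, List.filterMap_cons, ht2, hpar']
              simp
            · -- left parent (insert)
              have hC2 : (memo.getD (a, b+1) 0 + 1 = memo.getD (a+1, b+1) 0) = False := by
                rw [hgu, hgv, hval]
                exact eq_false (by omega)
              have hpar' : (pvE sl tl (a+1) (b+1)).2 = (a+1, b) := by
                rw [hpar, if_neg hdiag, if_neg hup]
              have ht1 : pvTok1 sl tl (a+1, b+1) = none := by
                simp only [pvTok1, hpar', hb1]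
                simp
              have ht2 : pvTok2 sl tl (a+1, b+1) = some (tl.getD b ' ', true) := by
                simp only [pvTok2, hpar', hb1]
                simp
              have hnext : (memo.get? (a+1, b)).isSome := by simp [hlv]
              have hstep : pvWalkB memo sl tl (fuel+1) (a+1, b+1) (r1, r2) =
                  pvWalkB memo sl tl fuel (a+1, b) (r1, r2 ++ [(tl.getD b ' ', true)]) := by
                rw [pvWalkB, if_neg h0]
                simp only [Nat.add_sub_cancel, hFa, hFb, hC1, hC2, if_true, if_false]
              rw [hstep, ih (a+1) b _ _ (fun _ => hnext)]
              rw [List.filterMap_cons, ht1, List.filterMap_cons, ht2, hpar']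
              simp

-- ===== markup: the sentinel replace equals run-grouping =====

-- character-level effect of .replace(DIFFOFF + DIFFON, '')
def pvStrip : List Char → List Char
  | [] => []
  | [c] => [c]
  | c1 :: c2 :: rest =>
      if c1 = '\x02' ∧ c2 = '\x01' then pvStrip rest else c1 :: pvStrip (c2 :: rest)
termination_by l => l.length

lemma strip_cons (c : Char) (l : List Char) (h : c ≠ '\x02') :
    pvStrip (c :: l) = c :: pvStrip l := by
  cases l with
  | nil => simp [pvStrip]
  | cons c2 rest => rw [pvStrip, if_neg (by tauto)]

lemma strip_two (c2 : Char) (l : List Char) (h : c2 ≠ '\x01') :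
    pvStrip ('\x02' :: c2 :: l) = '\x02' :: pvStrip (c2 :: l) := by
  rw [pvStrip, if_neg (by tauto)]

lemma go_eq : ∀ (fuel : Nat) (l acc : List Char), l.length ≤ fuel →
    PySem.Chars.replace.go ['\x02','\x01'] [] fuel l acc = acc.reverse ++ pvStrip l := by
  intro fuel
  induction fuel with
  | zero =>
      intro l acc h
      have : l = [] := List.eq_nil_of_length_eq_zero (by omega)
      subst this
      simp [PySem.Chars.replace.go, pvStrip]
  | succ fuel ih =>
      intro l acc h
      match l with
      | [] => simp [PySem.Chars.replace.go, pvStrip]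
      | c :: t =>
        rw [PySem.Chars.replace.go]
        by_cases hp : List.isPrefixOf ['\x02','\x01'] (c :: t) = true
        · rw [if_pos hp]
          match t with
          | [] => simp [List.isPrefixOf] at hp
          | c2 :: rest =>
            simp only [List.isPrefixOf, Bool.and_eq_true, beq_iff_eq] at hp
            obtain ⟨h1, h2, -⟩ := hp
            subst h1; subst h2
            simp only [List.length_cons] at h
            rw [show List.drop (['\x02','\x01'] : List Char).length
                  ('\x02' :: '\x01' :: rest) = rest from rfl]
            simp only [List.reverse_nil, List.nil_append]
            rw [ih rest acc (by omega), pvStrip, if_pos ⟨rfl, rfl⟩]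
        · rw [if_neg hp]
          simp only [List.length_cons] at h
          rw [ih t (c :: acc) (by omega)]
          have hc : pvStrip (c :: t) = c :: pvStrip t := by
            cases t with
            | nil => simp [pvStrip]
            | cons c2 rest =>
                rw [pvStrip]
                rw [if_neg]
                intro ⟨e1, e2⟩
                subst e1; subst e2
                simp [List.isPrefixOf] at hp
          rw [hc]
          simp

lemma pvReplace_eq_strip (cs : List Char) :
    PySem.Chars.replace cs ['\x02', '\x01'] [] = pvStrip cs := by
  rw [PySem.Chars.replace]
  rw [if_neg (by decide)]
  simpa using go_eq cs.length cs [] le_rfl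

-- the flattened pieces of a token list
def pvG : List (Char × Bool) → List Char
  | [] => []
  | (c, false) :: ts => c :: pvG ts
  | (c, true) :: ts => '\x01' :: c :: '\x02' :: pvG ts

-- recursive characterisation of the rendered output (inRun = an open DIFFON group)
def pvRS (inRun : Bool) : List (Char × Bool) → List Char
  | [] => if inRun then ['\x02'] else []
  | (c, chg) :: ts =>
      if chg then (if inRun then [] else ['\x01']) ++ c :: pvRS true ts
      else (if inRun then ['\x02'] else []) ++ c :: pvRS false ts

lemma pvStrip_g (ts : List (Char × Bool)) (h : ∀ p ∈ ts, p.1 ≠ '\x01' ∧ p.1 ≠ '\x02') :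
    pvStrip (pvG ts) = pvRS false ts ∧ pvStrip ('\x02' :: pvG ts) = pvRS true ts := by
  induction ts with
  | nil => constructor <;> simp [pvG, pvRS, pvStrip]
  | cons p ts ih =>
      obtain ⟨c, b⟩ := p
      obtain ⟨hc1, hc2⟩ := h (c, b) (List.mem_cons_self ..)
      have ih' := ih (fun q hq => h q (List.mem_cons_of_mem _ hq))
      cases b with
      | false =>
          constructor
          · rw [pvG, strip_cons c _ hc2, ih'.1, pvRS]
            simp
          · rw [pvG, strip_two c _ hc1, strip_cons c _ hc2, ih'.1, pvRS]
            simp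
      | true =>
          constructor
          · rw [pvG, strip_cons _ _ (by decide), strip_cons c _ hc2, ih'.2, pvRS]
            simp
          · rw [pvG, show pvStrip ('\x02' :: '\x01' :: c :: '\x02' :: pvG ts) =
                  pvStrip (c :: '\x02' :: pvG ts) from by rw [pvStrip, if_pos ⟨rfl, rfl⟩],
                strip_cons c _ hc2, ih'.2, pvRS]
            simp


lemma pvRenderStep_true (acc : List (List Char) × List Char) (c : Char) :
    pvRenderStep acc (c, true) = (acc.1, acc.2 ++ [c]) := rfl

lemma pvRenderStep_false (acc : List (List Char) × List Char) (c : Char) :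
    pvRenderStep acc (c, false) =
      ((if acc.2.isEmpty then acc.1 else acc.1 ++ ['\x01' :: acc.2 ++ ['\x02']]) ++ [[c]], []) := rfl

lemma pvRender_loop (ts : List (Char × Bool)) : ∀ (out : List (List Char)) (run : List Char),
    (let p := ts.foldl pvRenderStep (out, run)
     (if p.2.isEmpty then p.1 else p.1 ++ ['\x01' :: p.2 ++ ['\x02']]).flatten)
    = out.flatten ++ (if run.isEmpty then pvRS false ts else ('\x01' :: run) ++ pvRS true ts) := by
  induction ts with
  | nil =>
      intro out run
      cases run <;> simp [pvRS]
  | cons p ts ih =>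
      intro out run
      obtain ⟨c, b⟩ := p
      cases b with
      | true =>
          simp only [List.foldl_cons, pvRenderStep_true]
          rw [ih out (run ++ [c])]
          cases run <;> simp [pvRS]
      | false =>
          simp only [List.foldl_cons, pvRenderStep_false]
          rw [ih _ []]
          cases run <;> simp [pvRS]

lemma pvRender_eq_RS (ts : List (Char × Bool)) : pvRender ts = pvRS false ts := by
  have := pvRender_loop ts [] []
  simpa [pvRender] using this

lemma pvG_filterMap {α : Type} (f : α → List Char) (g : α → Option (Char × Bool))
    (h : ∀ c, f c = (match g c with
      | none => []
      | some (ch, false) => [ch]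
      | some (ch, true) => ['\x01', ch, '\x02'])) :
    ∀ l : List α, (l.map f).flatten = pvG (l.filterMap g) := by
  intro l
  induction l with
  | nil => rfl
  | cons x l ih =>
      rw [List.map_cons, List.flatten_cons, List.filterMap_cons, h x]
      cases hg : g x with
      | none => simpa using ih
      | some p =>
          obtain ⟨ch, b⟩ := p
          cases b <;> simp [pvG, ih]

-- pieces and tokens agree in shape
lemma pvP1_tok (sl tl : List Char) (c : Nat × Nat) :
    pvP1 sl tl c = (match pvTok1 sl tl c with
      | none => []
      | some (ch, false) => [ch]
      | some (ch, true) => ['\x01', ch, '\x02']) := by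
  unfold pvP1 pvTok1
  split_ifs <;> rfl

lemma pvP2_tok (sl tl : List Char) (c : Nat × Nat) :
    pvP2 sl tl c = (match pvTok2 sl tl c with
      | none => []
      | some (ch, false) => [ch]
      | some (ch, true) => ['\x01', ch, '\x02']) := by
  unfold pvP2 pvTok2
  split_ifs <;> rfl

-- sane'd characters are never the DIFFON/DIFFOFF sentinels
lemma pvSaneCh_plain (c : Char) : pvSaneCh c ≠ '\x01' ∧ pvSaneCh c ≠ '\x02' := by
  unfold pvSaneCh
  split_ifs with h
  · rcases h with h | h | h
    · subst h; decide
    · subst h; decide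
    · constructor <;> (intro he; subst he; simp at h)
  · decide

lemma pvGetD_plain (L : List Char) (k : Nat) :
    (L.map pvSaneCh).getD k ' ' ≠ '\x01' ∧ (L.map pvSaneCh).getD k ' ' ≠ '\x02' := by
  rw [List.getD_eq_getElem?_getD, List.getElem?_map]
  cases h : L[k]? with
  | none => constructor <;> decide
  | some c => simpa [h] using pvSaneCh_plain c

lemma pvTok1_plain (A B : List Char) (c : Nat × Nat) (p : Char × Bool)
    (hp : pvTok1 (A.map pvSaneCh) (B.map pvSaneCh) c = some p) :
    p.1 ≠ '\x01' ∧ p.1 ≠ '\x02' := by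
  unfold pvTok1 at hp
  split_ifs at hp <;> simp only [Option.some.injEq] at hp <;> rw [← hp] <;>
    exact pvGetD_plain A _

lemma pvTok2_plain (A B : List Char) (c : Nat × Nat) (p : Char × Bool)
    (hp : pvTok2 (A.map pvSaneCh) (B.map pvSaneCh) c = some p) :
    p.1 ≠ '\x01' ∧ p.1 ≠ '\x02' := by
  unfold pvTok2 at hp
  split_ifs at hp <;> simp only [Option.some.injEq] at hp <;> rw [← hp] <;>
    exact pvGetD_plain B _

-- ===== VERDICT (by name: the statement is the Claim_ definition above) =====
theorem linediff_spec : Claim_equal_linediff := by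
  intro s t _
  unfold Spec_linediff
  show linediff s t = linediff_alt s t
  simp only [linediff, linediff_alt, pvSane_eq]
  set sl := s.toList.map pvSaneCh with hsl
  set tl := t.toList.map pvSaneCh with htl
  rw [pvDP_eq]
  rw [pvPathA_eq sl tl sl.length tl.length (sl.length + tl.length + 1)
        sl.length tl.length [] le_rfl le_rfl]
  simp only [List.append_nil]
  have hbnd : ∀ c ∈ (pvTrace sl tl (sl.length + tl.length + 1) (sl.length, tl.length)).reverse,
      c.1 ≤ sl.length ∧ c.2 ≤ tl.length := fun c hc =>
    pvTrace_bounds sl tl sl.length tl.length _ sl.length tl.length le_rfl le_rfl c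
      (List.mem_reverse.mp hc)
  rw [pvEmit_eq sl tl sl.length tl.length _ hbnd]
  have hokE : pvMemoOK sl tl PySem.Dict.empty :=
    ⟨fun p v hp => by simp [PySem.Dict.get?_empty] at hp,
     fun p hp => by simp [PySem.Dict.get?_empty] at hp⟩
  obtain ⟨memo', fuel', heq, hok', hmono', hsome', hfu⟩ :=
    pvMemo_main sl tl (sl.length + tl.length) (sl.length, tl.length) le_rfl [] PySem.Dict.empty
      (5 ^ (sl.length + tl.length + 1)) hokE le_rfl
  rw [heq, pvMemoLoop_nil]
  rw [pvWalkB_eq sl tl memo' hok' (sl.length + tl.length + 1) sl.length tl.length [] []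
      (fun _ => by simp [hsome'])]
  simp only [List.nil_append]
  have hplain1 : ∀ p ∈ ((pvTrace sl tl (sl.length + tl.length + 1)
      (sl.length, tl.length)).reverse).filterMap (pvTok1 sl tl),
      p.1 ≠ '\x01' ∧ p.1 ≠ '\x02' := by
    intro p hp
    obtain ⟨c, _, htk⟩ := List.mem_filterMap.mp hp
    rw [hsl, htl] at htk
    exact pvTok1_plain s.toList t.toList c p htk
  have hplain2 : ∀ p ∈ ((pvTrace sl tl (sl.length + tl.length + 1)
      (sl.length, tl.length)).reverse).filterMap (pvTok2 sl tl),
      p.1 ≠ '\x01' ∧ p.1 ≠ '\x02' := by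
    intro p hp
    obtain ⟨c, _, htk⟩ := List.mem_filterMap.mp hp
    rw [hsl, htl] at htk
    exact pvTok2_plain s.toList t.toList c p htk
  have hside1 : PySem.Chars.replace
      (((pvTrace sl tl (sl.length + tl.length + 1) (sl.length, tl.length)).reverse.map
        (pvP1 sl tl)).flatten) ['\x02', '\x01'] []
      = pvRender ((pvTrace sl tl (sl.length + tl.length + 1)
          (sl.length, tl.length)).filterMap (pvTok1 sl tl)).reverse := by
    rw [pvG_filterMap (pvP1 sl tl) (pvTok1 sl tl) (pvP1_tok sl tl), pvReplace_eq_strip,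
        (pvStrip_g _ hplain1).1, List.filterMap_reverse, pvRender_eq_RS]
  have hside2 : PySem.Chars.replace
      (((pvTrace sl tl (sl.length + tl.length + 1) (sl.length, tl.length)).reverse.map
        (pvP2 sl tl)).flatten) ['\x02', '\x01'] []
      = pvRender ((pvTrace sl tl (sl.length + tl.length + 1)
          (sl.length, tl.length)).filterMap (pvTok2 sl tl)).reverse := by
    rw [pvG_filterMap (pvP2 sl tl) (pvTok2 sl tl) (pvP2_tok sl tl), pvReplace_eq_strip,
        (pvStrip_g _ hplain2).1, List.filterMap_reverse, pvRender_eq_RS]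
  rw [hside1, hside2]
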